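-- pv_equiv track=rewrite | github.com/arlerug/Prova-cheshire | plugins/ai_rag_retriever/hoosk.py | _recommend_documents
-- ===== SOURCE A (Python) =====
-- def _recommend_documents(query: str, ctx_text: str = "") -> list[dict]:
--     q = (query or "").lower()
--     ctx = (ctx_text or "").lower()
--
--     need_history   = any(k in q for k in ["ventennio", "provenienza", "atto certo", "pregiudiz", "gravami", "ipotec"])
--     need_identity  = any(k in q for k in ["identificativi", "foglio", "particella", "sub", "catasto", "mappale", "accatast"])
--     need_plan      = any(k in q for k in ["planimetria", "conformità", "planimetric"])
--     generic_check  = any(k in q for k in ["situazione", "controllare", "verificare", "stato", "immobile", "casa"])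
--
--     recs = []
--     if need_identity or generic_check:
--         recs.append({"doc": "Visura catastale attuale (Fabbricati/Terreni)",
--                      "per": "intestazioni, rendita/superficie, identificativi Comune–Foglio–Particella–Sub."})
--         recs.append({"doc": "Visura catastale storica",
--                      "per": "variazioni nel tempo (soppressioni/accorpamenti, dante/avente causa)."})
--
--     if need_plan or generic_check:
--         recs.append({"doc": "Planimetria catastale",
--                      "per": "confronto con lo stato di fatto; conformità catastale."})
--
--     if need_history or generic_check:
--         recs.append({"doc": "Atto di provenienza (rogito/donazione/successione)",
--                      "per": "individuare l’atto certo per la copertura del ventennio."})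
--         recs.append({"doc": "Ispezione ipotecaria ventennale (per soggetto e per immobile)",
--                      "per": "verifica formalità/gravami (ipoteche, pignoramenti, sequestri) ultimi 20 anni."})
--
--     if "succession" in q or "eredit" in q or "donaz" in q:
--         recs.append({"doc": "Dichiarazione di successione / Nota trascrizione donazione",
--                      "per": "completare la catena dei titoli se la provenienza non è un rogito standard."})
--
--     # dedup
--     seen = set(); ordered = []
--     for r in recs:
--         key = r["doc"]
--         if key not in seen:
--             seen.add(key); ordered.append(r)
--     return ordered
-- ===== SOURCE B (Python) =====
-- def _recommend_documents(query: str, ctx_text: str = "") -> list[dict]: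
--     q = (query or "").lower()
--     ctx = (ctx_text or "").lower()
--
--     def hit(keys):
--         return any(k in q for k in keys)
--
--     need_history  = hit(["ventennio", "provenienza", "atto certo", "pregiudiz", "gravami", "ipotec"])
--     need_identity = hit(["identificativi", "foglio", "particella", "sub", "catasto", "mappale", "accatast"])
--     need_plan     = hit(["planimetria", "conformità", "planimetric"])
--     generic_check = hit(["situazione", "controllare", "verificare", "stato", "immobile", "casa"])
--
--     rules = [
--         (need_identity or generic_check,
--          [{"doc": "Visura catastale attuale (Fabbricati/Terreni)",
--            "per": "intestazioni, rendita/superficie, identificativi Comune–Foglio–Particella–Sub."},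
--           {"doc": "Visura catastale storica",
--            "per": "variazioni nel tempo (soppressioni/accorpamenti, dante/avente causa)."}]),
--         (need_plan or generic_check,
--          [{"doc": "Planimetria catastale",
--            "per": "confronto con lo stato di fatto; conformità catastale."}]),
--         (need_history or generic_check,
--          [{"doc": "Atto di provenienza (rogito/donazione/successione)",
--            "per": "individuare l’atto certo per la copertura del ventennio."}]),
--         (need_history or generic_check,
--          [{"doc": "Ispezione ipotecaria ventennale (per soggetto e per immobile)",
--            "per": "verifica formalità/gravami (ipoteche, pignoramenti, sequestri) ultimi 20 anni."}]),
--         (hit(["succession", "eredit", "donaz"]),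
--          [{"doc": "Dichiarazione di successione / Nota trascrizione donazione",
--            "per": "completare la catena dei titoli se la provenienza non è un rogito standard."}]),
--     ]
--     # All document names are distinct, so no dedup pass is needed.
--     return [doc for trigger, docs in rules if trigger for doc in docs]
-- ===== Notes on version B (the rewrite author's own statement) =====
-- stated objective: simpler
-- what changed: Replaces the sequence of flat if/append blocks plus a dedup loop with a single data-driven rules table (trigger, documents) flattened by one comprehension; the dedup pass is dropped entirely since document names cannot repeat.
import Mathlib
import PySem

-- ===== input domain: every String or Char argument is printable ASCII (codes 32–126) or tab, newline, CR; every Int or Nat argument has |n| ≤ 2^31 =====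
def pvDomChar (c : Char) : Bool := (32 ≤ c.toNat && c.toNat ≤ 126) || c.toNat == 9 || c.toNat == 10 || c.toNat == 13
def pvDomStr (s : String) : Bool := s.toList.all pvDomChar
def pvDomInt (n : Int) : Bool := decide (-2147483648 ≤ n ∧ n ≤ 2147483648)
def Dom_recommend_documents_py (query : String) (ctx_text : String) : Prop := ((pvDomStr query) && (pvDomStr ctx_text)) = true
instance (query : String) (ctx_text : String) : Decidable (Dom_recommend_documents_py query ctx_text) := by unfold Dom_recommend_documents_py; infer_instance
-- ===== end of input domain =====

-- B replaces A's flat if/append blocks plus a dedup loop by a data-driven (trigger, documents)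
-- rules table flattened in one pass; the dedup pass is dropped since document names never repeat.

-- the six document dicts (shared literals; a Python dict is an association list)
def pvDoc1 : List (String × String) :=
  [("doc", "Visura catastale attuale (Fabbricati/Terreni)"),
   ("per", "intestazioni, rendita/superficie, identificativi Comune–Foglio–Particella–Sub.")]
def pvDoc2 : List (String × String) :=
  [("doc", "Visura catastale storica"),
   ("per", "variazioni nel tempo (soppressioni/accorpamenti, dante/avente causa).")]
def pvDoc3 : List (String × String) :=
  [("doc", "Planimetria catastale"),
   ("per", "confronto con lo stato di fatto; conformità catastale.")]
def pvDoc4 : List (String × String) :=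
  [("doc", "Atto di provenienza (rogito/donazione/successione)"),
   ("per", "individuare l’atto certo per la copertura del ventennio.")]
def pvDoc5 : List (String × String) :=
  [("doc", "Ispezione ipotecaria ventennale (per soggetto e per immobile)"),
   ("per", "verifica formalità/gravami (ipoteche, pignoramenti, sequestri) ultimi 20 anni.")]
def pvDoc6 : List (String × String) :=
  [("doc", "Dichiarazione di successione / Nota trascrizione donazione"),
   ("per", "completare la catena dei titoli se la provenienza non è un rogito standard.")]

-- ===== PORT A =====
-- tail of A after the four flags and the succession test are computed:
-- the if/append blocks building `recs`, then the seen-set dedup loop.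
def pvABody (need_history need_identity need_plan generic_check succ : Bool) :
    List (List (String × String)) :=
  let recs : List (List (String × String)) := []
  let recs := if need_identity || generic_check then recs ++ [pvDoc1, pvDoc2] else recs
  let recs := if need_plan || generic_check then recs ++ [pvDoc3] else recs
  let recs := if need_history || generic_check then recs ++ [pvDoc4, pvDoc5] else recs
  let recs := if succ then recs ++ [pvDoc6] else recs
  -- dedup: seen = set(); ordered = []; for r in recs: …
  let st := recs.foldl
    (fun (st : PySem.Set String × List (List (String × String))) r =>
      -- key = r["doc"]  (always present in these literal dicts, so getD "" is exact)
      let key := PySem.Dict.getD (PySem.Dict.mk r) "doc" ""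
      if !(PySem.Set.contains st.1 key) then (PySem.Set.add st.1 key, st.2 ++ [r]) else st)
    (PySem.Set.empty, [])
  st.2

def recommend_documents_py (query : String) (ctx_text : String) : List (List (String × String)) :=
  let q := PySem.Str.lower (if query == "" then "" else query)
  let _ctx := PySem.Str.lower (if ctx_text == "" then "" else ctx_text)
  let need_history := ["ventennio", "provenienza", "atto certo", "pregiudiz", "gravami", "ipotec"].any
    (fun k => PySem.Str.isIn k q)
  let need_identity := ["identificativi", "foglio", "particella", "sub", "catasto", "mappale", "accatast"].any
    (fun k => PySem.Str.isIn k q)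
  let need_plan := ["planimetria", "conformità", "planimetric"].any (fun k => PySem.Str.isIn k q)
  let generic_check := ["situazione", "controllare", "verificare", "stato", "immobile", "casa"].any
    (fun k => PySem.Str.isIn k q)
  pvABody need_history need_identity need_plan generic_check
    (PySem.Str.isIn "succession" q || PySem.Str.isIn "eredit" q || PySem.Str.isIn "donaz" q)

-- ===== PORT B =====
-- the rules table and its one-pass flattening ([doc for trigger, docs in rules if trigger for doc in docs])
def pvBBody (need_history need_identity need_plan generic_check succ : Bool) :
    List (List (String × String)) :=
  let rules : List (Bool × List (List (String × String))) :=
    [(need_identity || generic_check, [pvDoc1, pvDoc2]),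
     (need_plan || generic_check, [pvDoc3]),
     (need_history || generic_check, [pvDoc4]),
     (need_history || generic_check, [pvDoc5]),
     (succ, [pvDoc6])]
  rules.flatMap (fun p => if p.1 then p.2 else [])

def recommend_documents_py_alt (query : String) (ctx_text : String) : List (List (String × String)) :=
  let q := PySem.Str.lower (if query == "" then "" else query)
  let _ctx := PySem.Str.lower (if ctx_text == "" then "" else ctx_text)
  let hit := fun (keys : List String) => keys.any (fun k => PySem.Str.isIn k q)
  let need_history := hit ["ventennio", "provenienza", "atto certo", "pregiudiz", "gravami", "ipotec"]
  let need_identity := hit ["identificativi", "foglio", "particella", "sub", "catasto", "mappale", "accatast"]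
  let need_plan := hit ["planimetria", "conformità", "planimetric"]
  let generic_check := hit ["situazione", "controllare", "verificare", "stato", "immobile", "casa"]
  pvBBody need_history need_identity need_plan generic_check (hit ["succession", "eredit", "donaz"])

-- ===== PRECONDITION & SPEC =====
def Spec_recommend_documents_py (query : String) (ctx_text : String) (out : List (List (String × String))) : Prop := out = recommend_documents_py_alt query ctx_text
instance (query : String) (ctx_text : String) (out : List (List (String × String))) : Decidable (Spec_recommend_documents_py query ctx_text out) := by unfold Spec_recommend_documents_py; infer_instance

-- ===== CLAIM (what is proved, stated in full; the proofs are below) =====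
def Claim_equal_recommend_documents_py : Prop := ∀ (query : String) (ctx_text : String), Dom_recommend_documents_py query ctx_text → Spec_recommend_documents_py query ctx_text (recommend_documents_py query ctx_text)

-- ===== LEMMAS AND PROOFS =====

-- A's succession test is `hit` applied to the three keywords
theorem pvSuccEq (q : String) :
    (PySem.Str.isIn "succession" q || PySem.Str.isIn "eredit" q || PySem.Str.isIn "donaz" q)
      = ["succession", "eredit", "donaz"].any (fun k => PySem.Str.isIn k q) := by
  simp [List.any, Bool.or_assoc]

-- for every flag combination the dedup'd if/append result equals the flattened table
theorem pvBodyEq (h i p g s : Bool) : pvABody h i p g s = pvBBody h i p g s := by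
  cases h <;> cases i <;> cases p <;> cases g <;> cases s <;> rfl

-- ===== VERDICT (by name: the statement is the Claim_ definition above) =====
theorem recommend_documents_py_spec : Claim_equal_recommend_documents_py := by
  intro query ctx_text _
  simp only [Spec_recommend_documents_py, recommend_documents_py, recommend_documents_py_alt]
  rw [pvSuccEq]
  exact pvBodyEq _ _ _ _ _
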